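-- pv_equiv track=rewrite | github.com/zhenfelix/OnlineJudgeCodings | 塔子哥学算法/腾讯音乐-2023.3.23-第二题-划分字符串.py | solve
-- ===== SOURCE A (Python) =====
-- def solve(s,k):
--     n = len(s)
--     lo, hi = 1, n*n
--     def check(t):
--         cnt = 1
--         sz, visited = 0, set()
--         for ch in s:
--             sz += 1
--             visited.add(ch)
--             if len(visited)*sz > t:
--                 visited = set([ch])
--                 sz = 1
--                 cnt += 1
--             if cnt > k:
--                 return False
--         return True
--     while lo <= hi:
--         mid = (lo+hi)//2
--         if check(mid):
--             hi = mid - 1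
--         else:
--             lo = mid + 1
--     return lo
--
--     return cntb
-- ===== SOURCE B (Python) =====
-- def solve(s, k):
--     # Linear search over candidate costs 1..n*n (costs of single segments never
--     # exceed n*n); feasibility tested by a maximal-extension two-pointer greedy.
--     n = len(s)
--     def parts(t):
--         # number of segments in the greedy partition where every segment is
--         # extended as long as distinct*length stays <= t (a segment always
--         # takes at least its first character)
--         cnt, i = 0, 0
--         while i < n:
--             seen = {s[i]}
--             j = i + 1
--             while j < n and len(seen | {s[j]}) * (j - i + 1) <= t:
--                 seen.add(s[j])
--                 j += 1
--             cnt += 1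
--             i = j
--         return cnt
--     for t in range(1, n * n + 1):
--         if parts(t) <= k:
--             return t
--     return n * n + 1
-- ===== Notes on version B (the rewrite author's own statement) =====
-- stated objective: alternative
-- what changed: A binary-searches the answer in [1, n*n] with an early-exit reset-on-overflow greedy check; B instead scans candidate costs upward and returns the first feasible one, testing feasibility with a maximal-extension two-pointer segment greedy, so the search and the check are both structured differently.
import Mathlib
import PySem

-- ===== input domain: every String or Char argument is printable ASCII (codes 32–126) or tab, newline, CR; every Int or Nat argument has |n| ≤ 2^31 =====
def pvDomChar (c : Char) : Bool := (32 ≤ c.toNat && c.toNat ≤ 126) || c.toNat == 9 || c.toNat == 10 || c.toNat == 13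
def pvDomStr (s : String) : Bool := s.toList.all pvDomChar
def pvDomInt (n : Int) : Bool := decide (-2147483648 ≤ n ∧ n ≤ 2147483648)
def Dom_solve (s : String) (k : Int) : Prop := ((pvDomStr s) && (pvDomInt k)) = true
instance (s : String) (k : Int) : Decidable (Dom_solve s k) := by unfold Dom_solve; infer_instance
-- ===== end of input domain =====

-- B replaces A's binary search on the answer by a direct increasing scan over candidate costs,
-- with feasibility tested by a maximal-extension segment greedy (objective: alternative, not faster).

-- ===== PORT A =====
-- A's check(t): greedy fold over the characters with early False exit
def acheckGo (t k : Int) (cnt sz : Int) (vis : PySem.Set Char) : List Char → Bool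
  | [] => true
  | c :: cs =>
      if PySem.Set.len (PySem.Set.add vis c) * (sz + 1) > t then
        if cnt + 1 > k then false
        else acheckGo t k (cnt + 1) 1 (PySem.Set.ofList [c]) cs
      else
        if cnt > k then false
        else acheckGo t k cnt (sz + 1) (PySem.Set.add vis c) cs

-- A's while lo <= hi binary-search loop
def asearchGo (s : List Char) (k : Int) (lo hi : Int) : Int :=
  if h : lo ≤ hi then
    let mid := PySem.Int.floordiv (lo + hi) 2
    if acheckGo mid k 1 0 PySem.Set.empty s then asearchGo s k lo (mid - 1)
    else asearchGo s k (mid + 1) hi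
  else lo
termination_by (hi + 1 - lo).toNat
decreasing_by
  · have hb := PySem.Int.floordiv_two_mid_bounds h; omega
  · have hb := PySem.Int.floordiv_two_mid_bounds h; omega

def solve (s : String) (k : Int) : Int :=
  let n := PySem.Str.len s
  asearchGo s.toList k 1 (n * n)

-- ===== PORT B =====
-- B's inner while: extend the current segment (seen chars `seen`, length `sz`) while distinct*length ≤ t
def bext (t : Int) (seen : PySem.Set Char) (sz : Int) : List Char → List Char
  | [] => []
  | c :: cs =>
      if PySem.Set.len (PySem.Set.add seen c) * (sz + 1) ≤ t then
        bext t (PySem.Set.add seen c) (sz + 1) cs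
      else c :: cs

-- termination lemma for bparts (the extension only consumes characters)
theorem bext_suffix (t : Int) : ∀ (l : List Char) (seen : PySem.Set Char) (sz : Int),
    bext t seen sz l <:+ l := by
  intro l
  induction l with
  | nil => intro seen sz; simp [bext]
  | cons c cs ih =>
      intro seen sz
      simp only [bext]
      split
      · exact (ih _ _).trans (List.suffix_cons c cs)
      · exact List.suffix_rfl

-- B's outer while: count greedy segments
def bparts (t : Int) : List Char → Int
  | [] => 0
  | c :: cs => 1 + bparts t (bext t (PySem.Set.ofList [c]) 1 cs)
termination_by l => l.length
decreasing_by
  exact Nat.lt_succ_of_le (bext_suffix t cs _ _).length_le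

-- B's for t in range(1, n*n+1) loop
def bscanGo (s : List Char) (k n2 : Int) : List Int → Int
  | [] => n2 + 1
  | t :: ts => if bparts t s ≤ k then t else bscanGo s k n2 ts

def solve_alt (s : String) (k : Int) : Int :=
  let n := PySem.Str.len s
  bscanGo s.toList k (n * n) (PySem.List.pyRange 1 (n * n + 1) 1)

-- ===== PRECONDITION & SPEC =====
def Spec_solve (s : String) (k : Int) (out : Int) : Prop := out = solve_alt s k
instance (s : String) (k : Int) (out : Int) : Decidable (Spec_solve s k out) := by unfold Spec_solve; infer_instance

-- ===== CLAIM (what is proved, stated in full; the proofs are below) =====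
def Claim_equal_solve : Prop := ∀ (s : String) (k : Int), Dom_solve s k → Spec_solve s k (solve s k)

-- ===== LEMMAS AND PROOFS =====

-- A's greedy fold without the early exit: the final segment count (cnt included)
def afold (t cnt sz : Int) (vis : PySem.Set Char) : List Char → Int
  | [] => cnt
  | c :: cs =>
      if PySem.Set.len (PySem.Set.add vis c) * (sz + 1) > t then
        afold t (cnt + 1) 1 (PySem.Set.ofList [c]) cs
      else afold t cnt (sz + 1) (PySem.Set.add vis c) cs

theorem afold_ge (t : Int) : ∀ (l : List Char) (cnt sz : Int) (vis : PySem.Set Char),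
    cnt ≤ afold t cnt sz vis l := by
  intro l
  induction l with
  | nil => intro cnt sz vis; simp [afold]
  | cons c cs ih =>
      intro cnt sz vis
      simp only [afold]
      split
      · exact le_trans (by omega) (ih (cnt + 1) 1 (PySem.Set.ofList [c]))
      · exact ih cnt (sz + 1) (PySem.Set.add vis c)

-- early exit elimination: the Boolean check is "final count ≤ k"
theorem acheck_iff (t k : Int) : ∀ (l : List Char) (cnt sz : Int) (vis : PySem.Set Char),
    (cnt ≤ k ∨ l ≠ []) →
    (acheckGo t k cnt sz vis l = true ↔ afold t cnt sz vis l ≤ k) := by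
  intro l
  induction l with
  | nil =>
      intro cnt sz vis h
      cases h with
      | inl h => simp [acheckGo, afold, h]
      | inr h => exact absurd rfl h
  | cons c cs ih =>
      intro cnt sz vis _
      simp only [acheckGo, afold]
      split
      · split
        · rename_i hcnt
          have hge := afold_ge t cs (cnt + 1) 1 (PySem.Set.ofList [c])
          simp only [Bool.false_eq_true, false_iff]
          omega
        · rename_i hcnt
          exact ih (cnt + 1) 1 (PySem.Set.ofList [c]) (Or.inl (by omega))
      · split
        · rename_i hcnt
          have hge := afold_ge t cs cnt (sz + 1) (PySem.Set.add vis c)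
          simp only [Bool.false_eq_true, false_iff]
          omega
        · rename_i hcnt
          exact ih cnt (sz + 1) (PySem.Set.add vis c) (Or.inl (by omega))

-- A's fold counts exactly B's greedy segments
theorem afold_bparts (t : Int) : ∀ (l : List Char) (cnt sz : Int) (vis : PySem.Set Char),
    afold t cnt sz vis l = cnt + bparts t (bext t vis sz l) := by
  intro l
  induction l with
  | nil => intro cnt sz vis; simp [afold, bext, bparts]
  | cons c cs ih =>
      intro cnt sz vis
      simp only [afold, bext]
      by_cases hc : PySem.Set.len (PySem.Set.add vis c) * (sz + 1) ≤ t
      · rw [if_neg (by omega), if_pos hc]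
        exact ih cnt (sz + 1) (PySem.Set.add vis c)
      · rw [if_pos (by omega), if_neg hc]
        rw [ih (cnt + 1) 1 (PySem.Set.ofList [c]), bparts]
        omega

-- bridge: on a nonempty string and t ≥ 1, A's check decides "bparts ≤ k"
theorem check_bridge (t k : Int) (c : Char) (cs : List Char) (ht : 1 ≤ t) :
    (acheckGo t k 1 0 PySem.Set.empty (c :: cs) = true ↔ bparts t (c :: cs) ≤ k) := by
  rw [acheck_iff t k (c :: cs) 1 0 PySem.Set.empty (Or.inr (by simp)),
      afold_bparts t (c :: cs) 1 0 PySem.Set.empty]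
  have hb : bext t PySem.Set.empty 0 (c :: cs) = bext t (PySem.Set.ofList [c]) 1 cs := by
    simp only [bext]
    rw [if_pos]
    · rfl
    · show PySem.Set.len (PySem.Set.add PySem.Set.empty c) * (0 + 1) ≤ t
      simpa [PySem.Set.len] using ht
  rw [hb, bparts]

-- dominance: a later threshold and a dominated window state extend at least as far
theorem bext_mono (t t' : Int) (ht : t ≤ t') :
    ∀ (l : List Char) (seen seen' : PySem.Set Char) (sz sz' : Int),
    seen'.Nodup → seen' ⊆ seen → sz' ≤ sz → 0 ≤ sz' →
    bext t' seen' sz' l <:+ bext t seen sz l := by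
  intro l
  induction l with
  | nil => intro seen seen' sz sz' _ _ _ _; simp [bext]
  | cons c cs ih =>
      intro seen seen' sz sz' hsn hsub hsz hsz0
      have hsub' : PySem.Set.add seen' c ⊆ PySem.Set.add seen c := by
        intro x hx
        rw [PySem.Set.mem_add] at *
        exact hx.imp (fun h1 => hsub h1) id
      have hsn' : (PySem.Set.add seen' c).Nodup := PySem.Set.nodup_add _ _ hsn
      have hlen : ((PySem.Set.add seen' c).length : Int) ≤ ((PySem.Set.add seen c).length : Int) := by
        have : (PySem.Set.add seen' c).length ≤ (PySem.Set.add seen c).length := by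
          calc (PySem.Set.add seen' c).length = (PySem.Set.add seen' c).toFinset.card :=
                (List.toFinset_card_of_nodup hsn').symm
            _ ≤ (PySem.Set.add seen c).toFinset.card := Finset.card_le_card (fun x hx => by
                simp only [List.mem_toFinset] at *; exact hsub' hx)
            _ ≤ (PySem.Set.add seen c).length := (PySem.Set.add seen c).toFinset_card_le
        exact_mod_cast this
      simp only [bext]
      by_cases hc : PySem.Set.len (PySem.Set.add seen c) * (sz + 1) ≤ t
      · have hc' : PySem.Set.len (PySem.Set.add seen' c) * (sz' + 1) ≤ t' := by
          simp only [PySem.Set.len] at *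
          have h1 : ((PySem.Set.add seen' c).length : Int) * (sz' + 1) ≤
              ((PySem.Set.add seen c).length : Int) * (sz + 1) :=
            mul_le_mul hlen (by omega) (by omega) (by positivity)
          omega
        rw [if_pos hc, if_pos hc']
        exact ih _ _ _ _ hsn' hsub' (by omega) (by omega)
      · rw [if_neg hc]
        split
        · exact (bext_suffix t' cs _ _).trans (List.suffix_cons c cs)
        · exact List.suffix_rfl

-- a fresh window started at a later position ends no earlier
theorem bext_inner (t t' : Int) (ht : t ≤ t') (d : Char) (ds : List Char) :
    ∀ (l : List Char) (seen : PySem.Set Char) (sz : Int),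
    seen.Nodup → 0 ≤ sz → d :: ds <:+ l →
    bext t' (PySem.Set.ofList [d]) 1 ds <:+ bext t seen sz l := by
  intro l
  induction l with
  | nil => intro seen sz _ _ hsuf; simp at hsuf
  | cons c cs ih =>
      intro seen sz hsn hsz hsuf
      rcases List.suffix_cons_iff.mp hsuf with heq | hsuf'
      · obtain ⟨h1, h2⟩ : d = c ∧ ds = cs := by
          constructor <;> injection heq
        subst h1; subst h2
        simp only [bext]
        split
        · exact bext_mono t t' ht ds (PySem.Set.add seen d) (PySem.Set.ofList [d]) (sz + 1) 1
            (PySem.Set.nodup_ofList [d])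
            (fun x hx => by
              rw [PySem.Set.mem_add]
              have hxd : x = d := by simpa using hx
              exact Or.inr hxd)
            (by omega) (by omega)
        · exact (bext_suffix t' ds _ _).trans (List.suffix_cons d ds)
      · simp only [bext]
        split
        · exact ih _ _ (PySem.Set.nodup_add _ _ hsn) (by omega) hsuf'
        · exact ((bext_suffix t' ds _ _).trans (List.suffix_cons d ds)).trans hsuf

theorem bparts_nonneg (t : Int) : ∀ (l : List Char), 0 ≤ bparts t l := by
  intro l
  induction hl : l.length using Nat.strong_induction_on generalizing l with
  | _ n ih =>
      cases l with
      | nil => simp [bparts]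
      | cons c cs =>
          rw [bparts]
          have hle : (bext t (PySem.Set.ofList [c]) 1 cs).length < n := by
            have := (bext_suffix t cs (PySem.Set.ofList [c]) 1).length_le
            simp at hl
            omega
          have := ih _ hle _ rfl
          omega

-- the greedy segment count is antitone in the threshold and monotone under suffixes
theorem bparts_mono (t t' : Int) (ht : t ≤ t') :
    ∀ (l l' : List Char), l' <:+ l → bparts t' l' ≤ bparts t l := by
  suffices H : ∀ (n : Nat) (l l' : List Char), l.length ≤ n → l' <:+ l →
      bparts t' l' ≤ bparts t l by
    exact fun l l' h => H l.length l l' le_rfl h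
  intro n
  induction n with
  | zero =>
      intro l l' hlen hsuf
      have hl : l = [] := List.length_eq_zero_iff.mp (by omega)
      subst hl
      have hl' : l' = [] := List.suffix_nil.mp hsuf
      subst hl'
      simp [bparts]
  | succ n ih =>
      intro l l' hlen hsuf
      cases l' with
      | nil => simpa [bparts] using bparts_nonneg t l
      | cons d ds =>
          cases l with
          | nil => simp at hsuf
          | cons c cs =>
              have hcs : cs.length ≤ n := by simp at hlen; omega
              rcases List.suffix_cons_iff.mp hsuf with heq | hsuf'
              · obtain ⟨h1, h2⟩ : d = c ∧ ds = cs := by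
                  constructor <;> injection heq
                subst h1; subst h2
                rw [bparts, bparts]
                have hs := bext_mono t t' ht ds _ _ 1 1 (PySem.Set.nodup_ofList [d])
                  (fun x hx => hx) le_rfl (by omega)
                have hlen2 : (bext t (PySem.Set.ofList [d]) 1 ds).length ≤ n :=
                  le_trans (bext_suffix t ds _ _).length_le hcs
                have := ih _ _ hlen2 hs
                omega
              · rw [bparts, bparts]
                have hs := bext_inner t t' ht d ds cs _ 1 (PySem.Set.nodup_ofList [c]) (by omega) hsuf'
                have hlen2 : (bext t (PySem.Set.ofList [c]) 1 cs).length ≤ n :=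
                  le_trans (bext_suffix t cs _ _).length_le hcs
                have h1 := ih _ _ hlen2 hs
                have h2 := bparts_nonneg t' (bext t' (PySem.Set.ofList [d]) 1 ds)
                omega

-- the characterization both programs' results satisfy
def goodRes (L : List Char) (k n2 r : Int) : Prop :=
  1 ≤ r ∧ r ≤ n2 + 1 ∧ (∀ u, 1 ≤ u → u < r → ¬ bparts u L ≤ k) ∧ (r ≤ n2 → bparts r L ≤ k)

theorem goodRes_unique (L : List Char) (k n2 r1 r2 : Int)
    (h1 : goodRes L k n2 r1) (h2 : goodRes L k n2 r2) : r1 = r2 := by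
  obtain ⟨ha1, ha2, ha3, ha4⟩ := h1
  obtain ⟨hb1, hb2, hb3, hb4⟩ := h2
  rcases lt_trichotomy r1 r2 with h | h | h
  · exact absurd (ha4 (by omega)) (hb3 r1 ha1 h)
  · exact h
  · exact absurd (hb4 (by omega)) (ha3 r2 hb1 h)

theorem asearch_good (c : Char) (cs : List Char) (k n2 : Int) :
    ∀ (N : Nat) (lo hi : Int), (hi + 1 - lo).toNat ≤ N →
    1 ≤ lo → lo ≤ hi + 1 → hi ≤ n2 →
    (∀ u, 1 ≤ u → u < lo → ¬ bparts u (c :: cs) ≤ k) →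
    (∀ u, hi < u → u ≤ n2 → bparts u (c :: cs) ≤ k) →
    goodRes (c :: cs) k n2 (asearchGo (c :: cs) k lo hi) := by
  intro N
  induction N with
  | zero =>
      intro lo hi hN h1 h2 h3 hlow hhigh
      rw [asearchGo, dif_neg (by omega)]
      exact ⟨h1, by omega, hlow, fun hle => hhigh lo (by omega) hle⟩
  | succ N ih =>
      intro lo hi hN h1 h2 h3 hlow hhigh
      by_cases hlh : lo ≤ hi
      · rw [asearchGo, dif_pos hlh]
        have hb := PySem.Int.floordiv_two_mid_bounds hlh
        have hbr := check_bridge (PySem.Int.floordiv (lo + hi) 2) k c cs (by omega)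
        dsimp only
        split
        · rename_i hc
          have hqm := hbr.mp hc
          exact ih lo (PySem.Int.floordiv (lo + hi) 2 - 1) (by omega) h1 (by omega) (by omega)
            hlow
            (fun u hu hun2 =>
              le_trans (bparts_mono _ u (by omega) _ _ List.suffix_rfl) hqm)
        · rename_i hc
          have hnq : ¬ bparts (PySem.Int.floordiv (lo + hi) 2) (c :: cs) ≤ k :=
            fun hq => hc (hbr.mpr hq)
          exact ih (PySem.Int.floordiv (lo + hi) 2 + 1) hi (by omega) (by omega) (by omega) h3
            (fun u hu1 hu2 => by
              by_cases hu3 : u < lo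
              · exact hlow u hu1 hu3
              · exact fun hq => hnq (le_trans (bparts_mono u _ (by omega) _ _ List.suffix_rfl) hq))
            hhigh
      · rw [asearchGo, dif_neg hlh]
        exact ⟨h1, by omega, hlow, fun hle => hhigh lo (by omega) hle⟩

theorem bscan_good (L : List Char) (k n2 : Int) :
    ∀ (N : Nat) (t0 : Int), (n2 + 1 - t0).toNat ≤ N →
    1 ≤ t0 → t0 ≤ n2 + 1 →
    (∀ u, 1 ≤ u → u < t0 → ¬ bparts u L ≤ k) →
    goodRes L k n2 (bscanGo L k n2 (PySem.List.pyRange t0 (n2 + 1) 1)) := by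
  intro N
  induction N with
  | zero =>
      intro t0 hN h1 h2 hlow
      have ht0 : t0 = n2 + 1 := by omega
      subst ht0
      rw [PySem.List.pyRange_one_eq_nil (by omega), bscanGo]
      exact ⟨by omega, by omega, hlow, fun hle => absurd hle (by omega)⟩
  | succ N ih =>
      intro t0 hN h1 h2 hlow
      by_cases h : t0 < n2 + 1
      · rw [PySem.List.pyRange_one_cons h, bscanGo]
        split
        · rename_i hq
          exact ⟨h1, by omega, hlow, fun _ => hq⟩
        · rename_i hq
          exact ih (t0 + 1) (by omega) (by omega) (by omega)
            (fun u hu1 hu2 => by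
              by_cases hu3 : u < t0
              · exact hlow u hu1 hu3
              · have : u = t0 := by omega
                subst this
                exact hq)
      · have ht0 : t0 = n2 + 1 := by omega
        subst ht0
        rw [PySem.List.pyRange_one_eq_nil (by omega), bscanGo]
        exact ⟨by omega, by omega, hlow, fun hle => absurd hle (by omega)⟩

-- ===== VERDICT (by name: the statement is the Claim_ definition above) =====
theorem solve_spec : Claim_equal_solve := by
  intro s k _
  show solve s k = solve_alt s k
  simp only [solve, solve_alt]
  cases hL : s.toList with
  | nil =>
      have hn : PySem.Str.len s = 0 := by simp [PySem.Str.len, hL]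
      rw [hn]
      rw [asearchGo, dif_neg (by norm_num)]
      rw [PySem.List.pyRange_one_eq_nil (by norm_num), bscanGo]
      norm_num
  | cons c cs =>
      have hn2 : 0 ≤ PySem.Str.len s * PySem.Str.len s := mul_self_nonneg _
      exact goodRes_unique (c :: cs) k _ _ _
        (asearch_good c cs k _ (PySem.Str.len s * PySem.Str.len s).toNat 1 _
          (by omega) (by omega) (by omega) (by omega)
          (fun u hu1 hu2 => absurd hu1 (by omega))
          (fun u hu1 hu2 => absurd hu1 (by omega)))
        (bscan_good (c :: cs) k _ (PySem.Str.len s * PySem.Str.len s).toNat 1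
          (by omega) (by omega) (by omega)
          (fun u hu1 hu2 => absurd hu1 (by omega)))
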